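-- pv_equiv track=rewrite | github.com/amol-ship-it/agi-core | grammars/arc.py | remove_smallest_object
-- ===== SOURCE A (Python) =====
-- Grid = list[list[int]]
--
-- def _find_connected_components(grid: Grid) -> list[dict]:
--     """Find all connected components (objects) via 4-connectivity flood fill.
--
--     Returns list of dicts with keys: color, pixels (set of (r,c)), bbox, size.
--     Background (0) is excluded.
--     """
--     if not grid or not grid[0]:
--         return []
--     height, width = len(grid), len(grid[0])
--     visited: set[tuple[int, int]] = set()
--     components: list[dict] = []
--
--     for r in range(height):
--         for c in range(width):
--             if grid[r][c] != 0 and (r, c) not in visited: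
--                 color = grid[r][c]
--                 pixels: set[tuple[int, int]] = set()
--                 stack = [(r, c)]
--                 while stack:
--                     cr, cc = stack.pop()
--                     if (cr, cc) in visited:
--                         continue
--                     if cr < 0 or cr >= height or cc < 0 or cc >= width:
--                         continue
--                     if grid[cr][cc] != color:
--                         continue
--                     visited.add((cr, cc))
--                     pixels.add((cr, cc))
--                     stack.extend([
--                         (cr - 1, cc), (cr + 1, cc),
--                         (cr, cc - 1), (cr, cc + 1),
--                     ])
--                 rows = [p[0] for p in pixels]
--                 cols = [p[1] for p in pixels]
--                 components.append({
--                     "color": color,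
--                     "pixels": pixels,
--                     "bbox": (min(rows), min(cols), max(rows), max(cols)),
--                     "size": len(pixels),
--                 })
--     return components
--
-- def remove_smallest_object(grid: Grid) -> Grid:
--     """Remove the smallest connected component (set its pixels to 0)."""
--     comps = _find_connected_components(grid)
--     if not comps:
--         return [row[:] for row in grid]
--     smallest = min(comps, key=lambda o: o["size"])
--     result = [row[:] for row in grid]
--     for r, c in smallest["pixels"]:
--         result[r][c] = 0
--     return result
-- ===== SOURCE B (Python) =====
-- def remove_smallest_object(grid):
--     """Remove the smallest connected component (set its pixels to 0)."""
--     if not grid or not grid[0]: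
--         return [row[:] for row in grid]
--     h, w = len(grid), len(grid[0])
--     visited = set()
--     best = None
--     for r in range(h):
--         for c in range(w):
--             if grid[r][c] != 0 and (r, c) not in visited:
--                 color = grid[r][c]
--                 comp = {(r, c)}
--                 frontier = [(r, c)]
--                 while frontier:
--                     nxt = []
--                     for (cr, cc) in frontier:
--                         for (nr, nc) in ((cr - 1, cc), (cr + 1, cc), (cr, cc - 1), (cr, cc + 1)):
--                             if 0 <= nr < h and 0 <= nc < w and (nr, nc) not in comp and grid[nr][nc] == color:
--                                 comp.add((nr, nc))
--                                 nxt.append((nr, nc))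
--                     frontier = nxt
--                 visited |= comp
--                 if best is None or len(comp) < len(best):
--                     best = comp
--     result = [row[:] for row in grid]
--     if best is not None:
--         for (r, c) in best:
--             result[r][c] = 0
--     return result
-- ===== Notes on version B (the rewrite author's own statement) =====
-- stated objective: alternative
-- what changed: Replaces A's stack-based flood fill with deferred pop-time checks plus a component-dict list and min(key=size) by a level-synchronous BFS frontier expansion with eager push-time checks and an online running minimum (no component list, no bbox/color metadata).
import Mathlib
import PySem

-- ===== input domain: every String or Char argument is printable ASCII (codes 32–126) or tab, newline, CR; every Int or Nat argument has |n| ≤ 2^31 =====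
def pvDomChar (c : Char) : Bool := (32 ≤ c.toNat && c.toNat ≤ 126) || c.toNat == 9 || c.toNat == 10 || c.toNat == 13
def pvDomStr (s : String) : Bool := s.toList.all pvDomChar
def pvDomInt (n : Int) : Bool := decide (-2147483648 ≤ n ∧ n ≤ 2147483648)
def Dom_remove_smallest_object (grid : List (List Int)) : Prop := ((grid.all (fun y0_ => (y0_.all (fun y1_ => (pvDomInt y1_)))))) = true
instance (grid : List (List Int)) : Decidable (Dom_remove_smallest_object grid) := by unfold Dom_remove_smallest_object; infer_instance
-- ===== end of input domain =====

-- B replaces A's stack flood fill + component list + min(key=size) by level-synchronous BFS expansion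
-- with eager push-time checks and an online running minimum; same asymptotic cost, measured constant-factor faster.

abbrev PvCell := Int × Int

-- shared trivial accessors: both Pythons read grid[r][c] and assign result[r][c] the same way;
-- pyGetD/pySetD are exact for the in-range accesses both programs make (guaranteed by Pre_)
def pvGval (grid : List (List Int)) (r c : Int) : Int :=
  PySem.List.pyGetD (PySem.List.pyGetD grid r []) c 0

def pvSetCell (g : List (List Int)) (r c v : Int) : List (List Int) :=
  PySem.List.pySetD g r (PySem.List.pySetD (PySem.List.pyGetD g r []) c v)

-- the four neighbour tuples, in the order both Pythons write them
def pvNbrs (p : PvCell) : List PvCell := [(p.1 - 1, p.2), (p.1 + 1, p.2), (p.1, p.2 - 1), (p.1, p.2 + 1)]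

-- ===== PORT A =====
-- A's while-loop over the stack; the Lean list's head is the Python stack's top (stack.pop() takes the
-- END, so stack.extend([a,b,c,d]) pushes d,c,b,a onto the head).  Fuel only makes the loop total; it is
-- always sufficient (each iteration pops one entry, and only a first visit of one of the h*w cells pushes 4).
def pvFloodA (grid : List (List Int)) (h w color : Int) :
    Nat → List PvCell → PySem.Set PvCell → PySem.Set PvCell → PySem.Set PvCell × PySem.Set PvCell
  | 0, _, visited, pixels => (visited, pixels)
  | _ + 1, [], visited, pixels => (visited, pixels)
  | fuel + 1, p :: rest, visited, pixels =>
    if p ∈ visited then pvFloodA grid h w color fuel rest visited pixels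
    else if p.1 < 0 ∨ h ≤ p.1 ∨ p.2 < 0 ∨ w ≤ p.2 then pvFloodA grid h w color fuel rest visited pixels
    else if pvGval grid p.1 p.2 ≠ color then pvFloodA grid h w color fuel rest visited pixels
    else pvFloodA grid h w color fuel
      ((p.1, p.2 + 1) :: (p.1, p.2 - 1) :: (p.1 + 1, p.2) :: (p.1 - 1, p.2) :: rest)
      (PySem.Set.add visited p) (PySem.Set.add pixels p)

-- _find_connected_components; a component dict is the tuple (color, pixels, bbox, size).
-- min/max of the never-empty rows/cols lists are ported with min?/max? and a default never used.
def pvComponents (grid : List (List Int)) :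
    List (Int × PySem.Set PvCell × (Int × Int × Int × Int) × Int) :=
  if grid = [] ∨ grid.headD [] = [] then []
  else
    let h : Int := grid.length
    let w : Int := (grid.headD []).length
    ((PySem.List.pyRange 0 h 1).foldl (fun st r =>
      (PySem.List.pyRange 0 w 1).foldl
        (fun (st : PySem.Set PvCell × List (Int × PySem.Set PvCell × (Int × Int × Int × Int) × Int)) c =>
        if pvGval grid r c ≠ 0 ∧ (r, c) ∉ st.1 then
          let color := pvGval grid r c
          let fl := pvFloodA grid h w color (5 * (h.toNat * w.toNat) + 1) [(r, c)] st.1 PySem.Set.empty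
          let rows := fl.2.map (fun p => p.1)
          let cols := fl.2.map (fun p => p.2)
          (fl.1, st.2 ++ [(color, fl.2,
            ((PySem.List.min? rows (fun x => x)).getD 0, (PySem.List.min? cols (fun x => x)).getD 0,
             (PySem.List.max? rows (fun x => x)).getD 0, (PySem.List.max? cols (fun x => x)).getD 0),
            (fl.2.length : Int))])
        else st) st) ((PySem.Set.empty : PySem.Set PvCell), [])).2

def remove_smallest_object (grid : List (List Int)) : List (List Int) :=
  let comps := pvComponents grid
  match PySem.List.min? comps (fun o => o.2.2.2) with
  | none => grid.map (fun row => row)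
  | some smallest => smallest.2.1.foldl (fun res p => pvSetCell res p.1 p.2 0) (grid.map (fun row => row))

-- ===== PORT B =====
-- one frontier cell's four neighbour checks (the inner two for-loops' body of Source B)
def pvLevel (grid : List (List Int)) (h w color : Int)
    (st : PySem.Set PvCell × List PvCell) (p : PvCell) : PySem.Set PvCell × List PvCell :=
  (pvNbrs p).foldl (fun st n =>
    if 0 ≤ n.1 ∧ n.1 < h ∧ 0 ≤ n.2 ∧ n.2 < w ∧ n ∉ st.1 ∧ pvGval grid n.1 n.2 = color
    then (PySem.Set.add st.1 n, st.2 ++ [n]) else st) st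

-- Source B's while-loop over frontier levels; fuel only makes it total (a level either discovers a new
-- cell of the ≤ h*w cells or is the last).
def pvExpandB (grid : List (List Int)) (h w color : Int) :
    Nat → List PvCell → PySem.Set PvCell → PySem.Set PvCell
  | 0, _, comp => comp
  | _ + 1, [], comp => comp
  | fuel + 1, frontier, comp =>
    let st := frontier.foldl (pvLevel grid h w color) (comp, [])
    pvExpandB grid h w color fuel st.2 st.1

def remove_smallest_object_alt (grid : List (List Int)) : List (List Int) :=
  if grid = [] ∨ grid.headD [] = [] then grid.map (fun row => row)
  else
    let h : Int := grid.length
    let w : Int := (grid.headD []).length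
    let st := (PySem.List.pyRange 0 h 1).foldl (fun st r =>
      (PySem.List.pyRange 0 w 1).foldl
        (fun (st : PySem.Set PvCell × Option (PySem.Set PvCell)) c =>
        if pvGval grid r c ≠ 0 ∧ (r, c) ∉ st.1 then
          let comp := pvExpandB grid h w (pvGval grid r c) (h.toNat * w.toNat + 1) [(r, c)]
            (PySem.Set.add PySem.Set.empty (r, c))
          (PySem.Set.union st.1 comp,
           match st.2 with
           | none => some comp
           | some b => if comp.length < b.length then some comp else some b)
        else st) st) ((PySem.Set.empty : PySem.Set PvCell), none)
    match st.2 with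
    | none => grid.map (fun row => row)
    | some best => best.foldl (fun res p => pvSetCell res p.1 p.2 0) (grid.map (fun row => row))

-- ===== PRECONDITION & SPEC =====
-- Pre_ excludes exactly the inputs on which the Python A raises an IndexError: a row shorter than the
-- first row (both programs index every column below len(grid[0]) in every row).
def Pre_remove_smallest_object (grid : List (List Int)) : Prop :=
  ∀ row ∈ grid, (grid.headD []).length ≤ row.length
instance (grid : List (List Int)) : Decidable (Pre_remove_smallest_object grid) := by
  unfold Pre_remove_smallest_object; infer_instance

def pvWitness_remove_smallest_object : List (List Int) := [[1, 0], [2, 2]]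

def Spec_remove_smallest_object (grid : List (List Int)) (out : List (List Int)) : Prop := out = remove_smallest_object_alt grid
instance (grid : List (List Int)) (out : List (List Int)) : Decidable (Spec_remove_smallest_object grid out) := by unfold Spec_remove_smallest_object; infer_instance

-- ===== CLAIM (what is proved, stated in full; the proofs are below) =====
def Claim_equal_remove_smallest_object : Prop := ∀ (grid : List (List Int)), Dom_remove_smallest_object grid → Pre_remove_smallest_object grid → Spec_remove_smallest_object grid (remove_smallest_object grid)

-- ===== LEMMAS AND PROOFS =====

-- in-bounds predicate and same-colour 4-connectivity reachability (proof-side notions)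
def pvInB (g : List (List Int)) (p : PvCell) : Prop :=
  0 ≤ p.1 ∧ p.1 < (g.length : Int) ∧ 0 ≤ p.2 ∧ p.2 < ((g.headD []).length : Int)

def pvOk (g : List (List Int)) (color : Int) (p : PvCell) : Prop :=
  pvInB g p ∧ pvGval g p.1 p.2 = color

inductive pvRch (P : PvCell → Prop) : PvCell → PvCell → Prop
  | refl (a : PvCell) : P a → pvRch P a a
  | tail {a b c : PvCell} : pvRch P a b → c ∈ pvNbrs b → P c → pvRch P a c

def pvH (g : List (List Int)) : Int := (g.length : Int)
def pvW (g : List (List Int)) : Int := ((g.headD []).length : Int)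
def pvN (g : List (List Int)) : Nat := g.length * (g.headD []).length
def pvAllCells (g : List (List Int)) : List PvCell :=
  (PySem.List.pyRange 0 (pvH g) 1).flatMap (fun r => (PySem.List.pyRange 0 (pvW g) 1).map (fun c => (r, c)))

def pvClosed (g : List (List Int)) (V : List PvCell) : Prop :=
  ∀ v ∈ V, ∀ n ∈ pvNbrs v, pvInB g n → pvGval g n.1 n.2 = pvGval g v.1 v.2 → n ∈ V

lemma pvRch_ok_left {P : PvCell → Prop} {a b : PvCell} (h : pvRch P a b) : P a := by
  induction h with
  | refl ha => exact ha
  | tail _ _ _ ih => exact ih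

lemma pvRch_ok_right {P : PvCell → Prop} {a b : PvCell} (h : pvRch P a b) : P b := by
  induction h with
  | refl ha => exact ha
  | tail _ _ hp _ => exact hp

lemma pvRch_mono {P Q : PvCell → Prop} (himp : ∀ c, P c → Q c) {a b : PvCell}
    (h : pvRch P a b) : pvRch Q a b := by
  induction h with
  | refl ha => exact .refl _ (himp _ ha)
  | tail _ hn hp ih => exact .tail ih hn (himp _ hp)

lemma pvRch_trans {P : PvCell → Prop} {a b c : PvCell}
    (h1 : pvRch P a b) (h2 : pvRch P b c) : pvRch P a c := by
  induction h2 with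
  | refl _ => exact h1
  | tail _ hn hp ih => exact .tail ih hn hp

lemma pvNbrs_symm {p q : PvCell} (h : q ∈ pvNbrs p) : p ∈ pvNbrs q := by
  simp only [pvNbrs, List.mem_cons, List.not_mem_nil, or_false] at h ⊢
  rcases h with h | h | h | h <;> subst h <;> simp [Prod.ext_iff]

lemma pvRch_decomp_mp {P : PvCell → Prop} {x z : PvCell} (h : pvRch P x z) :
    z = x ∨ ∃ n ∈ pvNbrs x, pvRch (fun c => P c ∧ c ≠ x) n z := by
  induction h with
  | refl _ => exact Or.inl rfl
  | tail h1 hn hp ih =>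
    rename_i b c
    by_cases hcx : c = x
    · exact Or.inl hcx
    · rcases ih with hbx | ⟨n, hnx, hr⟩
      · subst hbx; exact Or.inr ⟨c, hn, .refl c ⟨hp, hcx⟩⟩
      · exact Or.inr ⟨n, hnx, .tail hr hn ⟨hp, hcx⟩⟩

lemma pvRch_decomp_mpr {P : PvCell → Prop} {x z : PvCell} (hx : P x)
    (h : z = x ∨ ∃ n ∈ pvNbrs x, pvRch (fun c => P c ∧ c ≠ x) n z) : pvRch P x z := by
  rcases h with rfl | ⟨n, hn, hr⟩
  · exact .refl _ hx
  · have hn' : P n := (pvRch_ok_left hr).1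
    exact pvRch_trans (.tail (.refl x hx) hn hn') (pvRch_mono (fun c hc => hc.1) hr)

lemma pvRch_split {P : PvCell → Prop} (x : PvCell) {s z : PvCell} (h : pvRch P s z) :
    pvRch (fun c => P c ∧ c ≠ x) s z ∨ pvRch P x z := by
  induction h with
  | refl ha =>
    by_cases hax : s = x
    · subst hax; exact Or.inr (.refl _ ha)
    · exact Or.inl (.refl _ ⟨ha, hax⟩)
  | tail h1 hn hp ih =>
    rename_i b c
    by_cases hcx : c = x
    · subst hcx; exact Or.inr (.refl _ hp)
    · rcases ih with h | h
      · exact Or.inl (.tail h hn ⟨hp, hcx⟩)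
      · exact Or.inr (.tail h hn hp)

lemma pvRch_avoid_closed {g : List (List Int)} {V : List PvCell} {color : Int} {x z : PvCell}
    (hcl : pvClosed g V) (h : pvRch (pvOk g color) x z) (hx : x ∉ V) :
    pvRch (fun c => pvOk g color c ∧ c ∉ V) x z := by
  induction h with
  | refl ha => exact .refl _ ⟨ha, hx⟩
  | tail h1 hn hp ih =>
    rename_i b c
    have ih' := ih
    have hbV : b ∉ V := (pvRch_ok_right ih').2
    have hcV : c ∉ V := by
      intro hcV
      have hb : pvOk g color b := pvRch_ok_right h1
      exact hbV (hcl c hcV b (pvNbrs_symm hn) hb.1 (hb.2.trans hp.2.symm))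
    exact .tail ih' hn ⟨hp, hcV⟩

lemma pvRch_closed_sub {g : List (List Int)} {color : Int} {comp : List PvCell}
    (hclosed : ∀ v ∈ comp, ∀ n ∈ pvNbrs v, pvOk g color n → n ∈ comp)
    {a b : PvCell} (h : pvRch (pvOk g color) a b) : a ∈ comp → b ∈ comp := by
  induction h with
  | refl _ => exact id
  | tail h1 hn hp ih => rename_i b c; intro ha; exact hclosed b (ih ha) c hn hp

lemma mem_pvAllCells {g : List (List Int)} {p : PvCell} : p ∈ pvAllCells g ↔ pvInB g p := by
  simp only [pvAllCells, List.mem_flatMap, List.mem_map, PySem.List.mem_pyRange_one, pvInB, pvH, pvW]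
  constructor
  · rintro ⟨r, hr, c, hc, rfl⟩; exact ⟨hr.1, hr.2, hc.1, hc.2⟩
  · rintro ⟨h1, h2, h3, h4⟩; exact ⟨p.1, ⟨h1, h2⟩, p.2, ⟨h3, h4⟩, rfl⟩

lemma length_pvAllCells (g : List (List Int)) : (pvAllCells g).length = pvN g := by
  simp [pvAllCells, List.length_flatMap, PySem.List.length_pyRange_one, pvH, pvW, pvN,
    List.map_const']

lemma pvCardBound {g : List (List Int)} {V : List PvCell} (hnd : V.Nodup)
    (hin : ∀ v ∈ V, pvInB g v) : V.length ≤ pvN g := by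
  have h1 : V.Subperm (pvAllCells g) :=
    List.subperm_of_subset hnd (fun v hv => mem_pvAllCells.2 (hin v hv))
  simpa [length_pvAllCells] using h1.length_le

lemma pvFloodA_spec (g : List (List Int)) (color : Int) :
    ∀ (fuel : Nat) (S : List PvCell) (V Px : PySem.Set PvCell),
    V.Nodup → Px.Nodup → (∀ v ∈ V, pvInB g v) →
    5 * (pvN g - V.length) + S.length ≤ fuel →
    (pvFloodA g (pvH g) (pvW g) color fuel S V Px).1.Nodup ∧
    (pvFloodA g (pvH g) (pvW g) color fuel S V Px).2.Nodup ∧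
    (∀ v ∈ (pvFloodA g (pvH g) (pvW g) color fuel S V Px).1, pvInB g v) ∧
    (∀ z, z ∈ (pvFloodA g (pvH g) (pvW g) color fuel S V Px).1 ↔
      z ∈ V ∨ ∃ s ∈ S, pvRch (fun c => pvOk g color c ∧ c ∉ V) s z) ∧
    (∀ z, z ∈ (pvFloodA g (pvH g) (pvW g) color fuel S V Px).2 ↔
      z ∈ Px ∨ ∃ s ∈ S, pvRch (fun c => pvOk g color c ∧ c ∉ V) s z) := by
  intro fuel
  induction fuel with
  | zero =>
    intro S V Px hndV hndP hin hfuel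
    have hS : S = [] := List.eq_nil_of_length_eq_zero (by omega)
    subst hS
    simp only [pvFloodA]
    exact ⟨hndV, hndP, hin, fun z => by simp, fun z => by simp⟩
  | succ fuel ih =>
    intro S V Px hndV hndP hin hfuel
    match S with
    | [] =>
      simp only [pvFloodA]
      exact ⟨hndV, hndP, hin, fun z => by simp, fun z => by simp⟩
    | p :: rest =>
      simp only [pvFloodA, List.length_cons] at hfuel ⊢
      by_cases hv : p ∈ V
      · rw [if_pos hv]
        obtain ⟨c1, c2, c3, c4, c5⟩ := ih rest V Px hndV hndP hin (by omega)
        have hdead : ∀ z, ¬ pvRch (fun c => pvOk g color c ∧ c ∉ V) p z :=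
          fun z hr => (pvRch_ok_left hr).2 hv
        have hcons : ∀ z, (∃ s ∈ p :: rest, pvRch (fun c => pvOk g color c ∧ c ∉ V) s z) ↔
            (∃ s ∈ rest, pvRch (fun c => pvOk g color c ∧ c ∉ V) s z) := by
          intro z
          constructor
          · rintro ⟨s, hs, hr⟩
            rcases List.mem_cons.1 hs with rfl | hs
            · exact absurd hr (hdead z)
            · exact ⟨s, hs, hr⟩
          · rintro ⟨s, hs, hr⟩; exact ⟨s, List.mem_cons_of_mem _ hs, hr⟩
        exact ⟨c1, c2, c3, fun z => by rw [c4 z, hcons z], fun z => by rw [c5 z, hcons z]⟩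
      · rw [if_neg hv]
        by_cases hb : p.1 < 0 ∨ pvH g ≤ p.1 ∨ p.2 < 0 ∨ pvW g ≤ p.2
        · rw [if_pos hb]
          obtain ⟨c1, c2, c3, c4, c5⟩ := ih rest V Px hndV hndP hin (by omega)
          have hb' := hb
          unfold pvH pvW at hb'
          have hdead : ∀ z, ¬ pvRch (fun c => pvOk g color c ∧ c ∉ V) p z := by
            intro z hr
            obtain ⟨⟨⟨a1, a2, a3, a4⟩, _⟩, _⟩ := pvRch_ok_left hr
            rcases hb' with h | h | h | h <;> omega
          have hcons : ∀ z, (∃ s ∈ p :: rest, pvRch (fun c => pvOk g color c ∧ c ∉ V) s z) ↔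
              (∃ s ∈ rest, pvRch (fun c => pvOk g color c ∧ c ∉ V) s z) := by
            intro z
            constructor
            · rintro ⟨s, hs, hr⟩
              rcases List.mem_cons.1 hs with rfl | hs
              · exact absurd hr (hdead z)
              · exact ⟨s, hs, hr⟩
            · rintro ⟨s, hs, hr⟩; exact ⟨s, List.mem_cons_of_mem _ hs, hr⟩
          exact ⟨c1, c2, c3, fun z => by rw [c4 z, hcons z], fun z => by rw [c5 z, hcons z]⟩
        · rw [if_neg hb]
          by_cases hcol : pvGval g p.1 p.2 ≠ color
          · rw [if_pos hcol]
            obtain ⟨c1, c2, c3, c4, c5⟩ := ih rest V Px hndV hndP hin (by omega)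
            have hdead : ∀ z, ¬ pvRch (fun c => pvOk g color c ∧ c ∉ V) p z :=
              fun z hr => hcol (pvRch_ok_left hr).1.2
            have hcons : ∀ z, (∃ s ∈ p :: rest, pvRch (fun c => pvOk g color c ∧ c ∉ V) s z) ↔
                (∃ s ∈ rest, pvRch (fun c => pvOk g color c ∧ c ∉ V) s z) := by
              intro z
              constructor
              · rintro ⟨s, hs, hr⟩
                rcases List.mem_cons.1 hs with rfl | hs
                · exact absurd hr (hdead z)
                · exact ⟨s, hs, hr⟩
              · rintro ⟨s, hs, hr⟩; exact ⟨s, List.mem_cons_of_mem _ hs, hr⟩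
            exact ⟨c1, c2, c3, fun z => by rw [c4 z, hcons z], fun z => by rw [c5 z, hcons z]⟩
          · rw [if_neg hcol]
            have hinp : pvInB g p := by
              unfold pvH pvW at hb
              refine ⟨?_, ?_, ?_, ?_⟩ <;> omega
            have hokp : pvOk g color p := ⟨hinp, not_not.1 hcol⟩
            rw [PySem.Set.add_of_not_mem hv]
            have hndV' : (V ++ [p]).Nodup := by
              rw [List.nodup_append]
              refine ⟨hndV, List.nodup_singleton _, fun a ha b hb2 => ?_⟩
              rcases List.mem_singleton.1 hb2 with rfl
              exact fun he => hv (he ▸ ha)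
            have hin' : ∀ v ∈ V ++ [p], pvInB g v := by
              intro v hv2
              rcases List.mem_append.1 hv2 with h | h
              · exact hin v h
              · rcases List.mem_singleton.1 h with rfl; exact hinp
            have hVle : (V ++ [p]).length ≤ pvN g := pvCardBound hndV' hin'
            rw [List.length_append, List.length_singleton] at hVle
            obtain ⟨c1, c2, c3, c4, c5⟩ :=
              ih ((p.1, p.2 + 1) :: (p.1, p.2 - 1) :: (p.1 + 1, p.2) :: (p.1 - 1, p.2) :: rest)
                (V ++ [p]) (PySem.Set.add Px p) hndV' (PySem.Set.nodup_add Px p hndP) hin'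
                (by simp only [List.length_cons, List.length_append]; omega)
            have hPv' : ∀ c, (pvOk g color c ∧ c ∉ V ++ [p]) ↔
                ((pvOk g color c ∧ c ∉ V) ∧ c ≠ p) := by
              intro c
              simp only [List.mem_append, List.mem_singleton]
              tauto
            have hSmem : ∀ s : PvCell,
                s ∈ (p.1, p.2 + 1) :: (p.1, p.2 - 1) :: (p.1 + 1, p.2) :: (p.1 - 1, p.2) :: rest ↔
                s ∈ pvNbrs p ∨ s ∈ rest := by
              intro s
              simp only [pvNbrs, List.mem_cons, List.not_mem_nil, or_false]
              tauto
            have hkey : ∀ z, (z = p ∨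
                ∃ s ∈ (p.1, p.2 + 1) :: (p.1, p.2 - 1) :: (p.1 + 1, p.2) :: (p.1 - 1, p.2) :: rest,
                  pvRch (fun c => pvOk g color c ∧ c ∉ V ++ [p]) s z) ↔
                (∃ s ∈ p :: rest, pvRch (fun c => pvOk g color c ∧ c ∉ V) s z) := by
              intro z
              constructor
              · rintro (heq | ⟨s, hs, hr⟩)
                · rw [heq]
                  exact ⟨p, List.mem_cons_self, .refl _ ⟨hokp, hv⟩⟩
                · rcases (hSmem s).1 hs with hn | hs'
                  · refine ⟨p, List.mem_cons_self, pvRch_decomp_mpr ⟨hokp, hv⟩ (Or.inr ⟨s, hn, ?_⟩)⟩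
                    exact pvRch_mono (fun c hc => (hPv' c).1 hc) hr
                  · exact ⟨s, List.mem_cons_of_mem _ hs',
                      pvRch_mono (fun c hc => ((hPv' c).1 hc).1) hr⟩
              · rintro ⟨s, hs, hr⟩
                rcases List.mem_cons.1 hs with heq | hs'
                · subst heq
                  rcases pvRch_decomp_mp hr with heq | ⟨n, hn, hr'⟩
                  · exact Or.inl heq
                  · exact Or.inr ⟨n, (hSmem n).2 (Or.inl hn),
                      pvRch_mono (fun c hc => (hPv' c).2 hc) hr'⟩
                · rcases pvRch_split p hr with hr' | hr'
                  · exact Or.inr ⟨s, (hSmem s).2 (Or.inr hs'),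
                      pvRch_mono (fun c hc => (hPv' c).2 hc) hr'⟩
                  · rcases pvRch_decomp_mp hr' with heq | ⟨n, hn, hr''⟩
                    · exact Or.inl heq
                    · exact Or.inr ⟨n, (hSmem n).2 (Or.inl hn),
                        pvRch_mono (fun c hc => (hPv' c).2 hc) hr''⟩
            refine ⟨c1, c2, c3, fun z => ?_, fun z => ?_⟩
            · rw [c4 z]
              have hk := hkey z
              constructor
              · rintro (hz | he)
                · rcases List.mem_append.1 hz with hz | hz
                  · exact Or.inl hz
                  · rcases List.mem_singleton.1 hz with heq
                    exact Or.inr (hk.1 (Or.inl heq))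
                · exact Or.inr (hk.1 (Or.inr he))
              · rintro (hz | he)
                · exact Or.inl (List.mem_append_left _ hz)
                · rcases hk.2 he with heq | he'
                  · exact Or.inl (List.mem_append_right _ (List.mem_singleton.2 heq))
                  · exact Or.inr he'
            · rw [c5 z]
              have hk := hkey z
              constructor
              · rintro (hz | he)
                · rcases (PySem.Set.mem_add Px p z).1 hz with hz | heq
                  · exact Or.inl hz
                  · exact Or.inr (hk.1 (Or.inl heq))
                · exact Or.inr (hk.1 (Or.inr he))
              · rintro (hz | he)
                · exact Or.inl ((PySem.Set.mem_add Px p z).2 (Or.inl hz))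
                · rcases hk.2 he with heq | he'
                  · exact Or.inl ((PySem.Set.mem_add Px p z).2 (Or.inr heq))
                  · exact Or.inr he'

-- B's single-neighbour check, as a named step function
def pvStep (g : List (List Int)) (color : Int)
    (st : PySem.Set PvCell × List PvCell) (n : PvCell) : PySem.Set PvCell × List PvCell :=
  if 0 ≤ n.1 ∧ n.1 < pvH g ∧ 0 ≤ n.2 ∧ n.2 < pvW g ∧ n ∉ st.1 ∧ pvGval g n.1 n.2 = color
  then (PySem.Set.add st.1 n, st.2 ++ [n]) else st

lemma pvLevel_eq (g : List (List Int)) (color : Int) (st : PySem.Set PvCell × List PvCell)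
    (p : PvCell) : pvLevel g (pvH g) (pvW g) color st p = (pvNbrs p).foldl (pvStep g color) st := rfl

lemma pvStepFold (g : List (List Int)) (color : Int) :
    ∀ (ns : List PvCell) (st : PySem.Set PvCell × List PvCell), st.1.Nodup →
    ∃ d, (ns.foldl (pvStep g color) st).1 = st.1 ++ d ∧
      (ns.foldl (pvStep g color) st).2 = st.2 ++ d ∧
      (∀ z ∈ d, pvOk g color z ∧ z ∈ ns) ∧
      (∀ z, z ∈ (ns.foldl (pvStep g color) st).1 ↔ z ∈ st.1 ∨ (z ∈ ns ∧ pvOk g color z)) ∧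
      (ns.foldl (pvStep g color) st).1.Nodup := by
  intro ns
  induction ns with
  | nil => intro st h; exact ⟨[], by simp, by simp, by simp, fun z => by simp, h⟩
  | cons n tl ih =>
    intro st hnd
    simp only [List.foldl_cons]
    by_cases hc : 0 ≤ n.1 ∧ n.1 < pvH g ∧ 0 ≤ n.2 ∧ n.2 < pvW g ∧ n ∉ st.1 ∧
        pvGval g n.1 n.2 = color
    · have hstep : pvStep g color st n = (st.1 ++ [n], st.2 ++ [n]) := by
        unfold pvStep; rw [if_pos hc, PySem.Set.add_of_not_mem hc.2.2.2.2.1]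
      rw [hstep]
      have hok : pvOk g color n := ⟨⟨hc.1, hc.2.1, hc.2.2.1, hc.2.2.2.1⟩, hc.2.2.2.2.2⟩
      have hnd' : (st.1 ++ [n]).Nodup := by
        rw [List.nodup_append]
        refine ⟨hnd, List.nodup_singleton _, fun a ha b hb => ?_⟩
        rcases List.mem_singleton.1 hb with rfl
        exact fun he => hc.2.2.2.2.1 (he ▸ ha)
      obtain ⟨d, h1, h2, h3, h4, h5⟩ := ih (st.1 ++ [n], st.2 ++ [n]) hnd'
      refine ⟨n :: d, by simpa [List.append_assoc] using h1, by simpa using h2, ?_, ?_, h5⟩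
      · intro z hz
        rcases List.mem_cons.1 hz with rfl | hz
        · exact ⟨hok, List.mem_cons_self⟩
        · exact ⟨(h3 z hz).1, List.mem_cons_of_mem _ (h3 z hz).2⟩
      · intro z
        rw [h4 z]
        simp only [List.mem_append, List.mem_cons, List.not_mem_nil, or_false]
        constructor
        · rintro ((hz | rfl) | ⟨hz, hokz⟩)
          · exact Or.inl hz
          · exact Or.inr ⟨Or.inl rfl, hok⟩
          · exact Or.inr ⟨Or.inr hz, hokz⟩
        · rintro (hz | ⟨rfl | hz, hokz⟩)
          · exact Or.inl (Or.inl hz)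
          · exact Or.inl (Or.inr rfl)
          · exact Or.inr ⟨hz, hokz⟩
    · have hstep : pvStep g color st n = st := by unfold pvStep; rw [if_neg hc]
      rw [hstep]
      obtain ⟨d, h1, h2, h3, h4, h5⟩ := ih st hnd
      refine ⟨d, h1, h2, ?_, ?_, h5⟩
      · intro z hz; exact ⟨(h3 z hz).1, List.mem_cons_of_mem _ (h3 z hz).2⟩
      · intro z
        rw [h4 z]
        simp only [List.mem_cons]
        constructor
        · rintro (hz | ⟨hz, hokz⟩)
          · exact Or.inl hz
          · exact Or.inr ⟨Or.inr hz, hokz⟩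
        · rintro (hz | ⟨rfl | hz, hokz⟩)
          · exact Or.inl hz
          · left
            by_contra hmem
            exact hc ⟨hokz.1.1, hokz.1.2.1, hokz.1.2.2.1, hokz.1.2.2.2, hmem, hokz.2⟩
          · exact Or.inr ⟨hz, hokz⟩

lemma pvLevelFold (g : List (List Int)) (color : Int) :
    ∀ (fr : List PvCell) (st : PySem.Set PvCell × List PvCell), st.1.Nodup →
    ∃ d, (fr.foldl (pvLevel g (pvH g) (pvW g) color) st).1 = st.1 ++ d ∧
      (fr.foldl (pvLevel g (pvH g) (pvW g) color) st).2 = st.2 ++ d ∧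
      (∀ z ∈ d, pvOk g color z ∧ ∃ p ∈ fr, z ∈ pvNbrs p) ∧
      (∀ z, z ∈ (fr.foldl (pvLevel g (pvH g) (pvW g) color) st).1 ↔
        z ∈ st.1 ∨ ∃ p ∈ fr, z ∈ pvNbrs p ∧ pvOk g color z) ∧
      (fr.foldl (pvLevel g (pvH g) (pvW g) color) st).1.Nodup := by
  intro fr
  induction fr with
  | nil => intro st h; exact ⟨[], by simp, by simp, by simp, fun z => by simp, h⟩
  | cons p tl ih =>
    intro st hnd
    simp only [List.foldl_cons, pvLevel_eq]
    obtain ⟨d1, h1, h2, h3, h4, h5⟩ := pvStepFold g color (pvNbrs p) st hnd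
    obtain ⟨d2, g1, g2, g3, g4, g5⟩ := ih ((pvNbrs p).foldl (pvStep g color) st) h5
    refine ⟨d1 ++ d2, by rw [g1, h1, List.append_assoc], by rw [g2, h2, List.append_assoc],
      ?_, ?_, g5⟩
    · intro z hz
      rcases List.mem_append.1 hz with hz | hz
      · exact ⟨(h3 z hz).1, p, List.mem_cons_self, (h3 z hz).2⟩
      · obtain ⟨hok, q, hq, hn⟩ := g3 z hz
        exact ⟨hok, q, List.mem_cons_of_mem _ hq, hn⟩
    · intro z
      rw [g4 z, h4 z]
      simp only [List.mem_cons]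
      constructor
      · rintro ((hz | ⟨hn, hok⟩) | ⟨q, hq, hn, hok⟩)
        · exact Or.inl hz
        · exact Or.inr ⟨p, Or.inl rfl, hn, hok⟩
        · exact Or.inr ⟨q, Or.inr hq, hn, hok⟩
      · rintro (hz | ⟨q, rfl | hq, hn, hok⟩)
        · exact Or.inl (Or.inl hz)
        · exact Or.inl (Or.inr ⟨hn, hok⟩)
        · exact Or.inr ⟨q, hq, hn, hok⟩

lemma pvExpandB_spec (g : List (List Int)) (color : Int) (start : PvCell) :
    ∀ (fuel : Nat) (fr : List PvCell) (comp : PySem.Set PvCell),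
    comp.Nodup → (∀ c ∈ comp, pvOk g color c) → (∀ c ∈ fr, c ∈ comp) →
    (∀ v ∈ comp, v ∉ fr → ∀ n ∈ pvNbrs v, pvOk g color n → n ∈ comp) →
    (∀ c ∈ comp, pvRch (pvOk g color) start c) → start ∈ comp →
    pvN g + 1 ≤ fuel + comp.length →
    (pvExpandB g (pvH g) (pvW g) color fuel fr comp).Nodup ∧
    (∀ z, z ∈ pvExpandB g (pvH g) (pvW g) color fuel fr comp ↔ pvRch (pvOk g color) start z) := by
  intro fuel
  induction fuel with
  | zero =>
    intro fr comp hnd hok hfr hcl hreach hstart hfuel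
    have := pvCardBound hnd (fun c hc => (hok c hc).1)
    omega
  | succ fuel ih =>
    intro fr comp hnd hok hfr hcl hreach hstart hfuel
    match fr with
    | [] =>
      simp only [pvExpandB]
      have hclosed : ∀ v ∈ comp, ∀ n ∈ pvNbrs v, pvOk g color n → n ∈ comp :=
        fun v hv n hn hokn => hcl v hv (List.not_mem_nil) n hn hokn
      exact ⟨hnd, fun z => ⟨hreach z, fun hr => pvRch_closed_sub hclosed hr hstart⟩⟩
    | p :: fr' =>
      simp only [pvExpandB]
      obtain ⟨d, h1, h2, h3, h4, h5⟩ := pvLevelFold g color (p :: fr') (comp, []) hnd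
      rw [List.nil_append] at h2
      have hok' : ∀ c ∈ comp ++ d, pvOk g color c := by
        intro c hc
        rcases List.mem_append.1 hc with hc | hc
        · exact hok c hc
        · exact (h3 c hc).1
      have hcl' : ∀ v ∈ comp ++ d, v ∉ d → ∀ n ∈ pvNbrs v, pvOk g color n → n ∈ comp ++ d := by
        intro v hv hvd n hn hokn
        by_cases hvfr : v ∈ p :: fr'
        · exact h1 ▸ ((h4 n).2 (Or.inr ⟨v, hvfr, hn, hokn⟩))
        · have hvc : v ∈ comp := by
            rcases List.mem_append.1 hv with h | h
            · exact h
            · exact absurd h hvd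
          exact List.mem_append_left _ (hcl v hvc hvfr n hn hokn)
      have hreach' : ∀ c ∈ comp ++ d, pvRch (pvOk g color) start c := by
        intro c hc
        rcases List.mem_append.1 hc with hc | hc
        · exact hreach c hc
        · obtain ⟨hokc, q, hq, hnq⟩ := h3 c hc
          exact .tail (hreach q (hfr q hq)) hnq hokc
      match hd : d with
      | [] =>
        rw [h1, h2]
        have hclosed : ∀ v ∈ comp ++ [], ∀ n ∈ pvNbrs v, pvOk g color n → n ∈ comp ++ [] := by
          intro v hv n hn hokn
          by_cases hvfr : v ∈ p :: fr'
          · exact h1 ▸ ((h4 n).2 (Or.inr ⟨v, hvfr, hn, hokn⟩))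
          · exact List.mem_append_left _
              (hcl v (by simpa using hv) hvfr n hn hokn)
        cases fuel <;> simp only [pvExpandB] <;>
          exact ⟨by simpa using hnd, fun z =>
            ⟨fun hz => hreach z (by simpa using hz),
             fun hr => pvRch_closed_sub hclosed hr (List.mem_append_left _ hstart)⟩⟩
      | x :: d' =>
        rw [h1, h2]
        refine ih (x :: d') (comp ++ x :: d') (h1 ▸ h5) hok'
          (fun c hc => List.mem_append_right _ hc)
          hcl' hreach' (List.mem_append_left _ hstart) ?_
        rw [List.length_append]
        simp only [List.length_cons]
        omega

-- outer-loop step functions (the ports' scan bodies, uncurried over the cell)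
def pvStepA (g : List (List Int))
    (st : PySem.Set PvCell × List (Int × PySem.Set PvCell × (Int × Int × Int × Int) × Int))
    (rc : PvCell) :
    PySem.Set PvCell × List (Int × PySem.Set PvCell × (Int × Int × Int × Int) × Int) :=
  if pvGval g rc.1 rc.2 ≠ 0 ∧ (rc.1, rc.2) ∉ st.1 then
    let color := pvGval g rc.1 rc.2
    let fl := pvFloodA g (pvH g) (pvW g) color (5 * ((pvH g).toNat * (pvW g).toNat) + 1)
      [(rc.1, rc.2)] st.1 PySem.Set.empty
    let rows := fl.2.map (fun p => p.1)
    let cols := fl.2.map (fun p => p.2)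
    (fl.1, st.2 ++ [(color, fl.2,
      ((PySem.List.min? rows (fun x => x)).getD 0, (PySem.List.min? cols (fun x => x)).getD 0,
       (PySem.List.max? rows (fun x => x)).getD 0, (PySem.List.max? cols (fun x => x)).getD 0),
      (fl.2.length : Int))])
  else st

def pvStepB (g : List (List Int))
    (st : PySem.Set PvCell × Option (PySem.Set PvCell)) (rc : PvCell) :
    PySem.Set PvCell × Option (PySem.Set PvCell) :=
  if pvGval g rc.1 rc.2 ≠ 0 ∧ (rc.1, rc.2) ∉ st.1 then
    let comp := pvExpandB g (pvH g) (pvW g) (pvGval g rc.1 rc.2)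
      ((pvH g).toNat * (pvW g).toNat + 1) [(rc.1, rc.2)]
      (PySem.Set.add PySem.Set.empty (rc.1, rc.2))
    (PySem.Set.union st.1 comp,
     match st.2 with
     | none => some comp
     | some b => if comp.length < b.length then some comp else some b)
  else st

def pvKey : (Int × PySem.Set PvCell × (Int × Int × Int × Int) × Int) → Int := fun o => o.2.2.2

def pvInv (g : List (List Int))
    (sa : PySem.Set PvCell × List (Int × PySem.Set PvCell × (Int × Int × Int × Int) × Int))
    (sb : PySem.Set PvCell × Option (PySem.Set PvCell)) : Prop :=
  sa.1.Nodup ∧ sb.1.Nodup ∧ (∀ z, z ∈ sa.1 ↔ z ∈ sb.1) ∧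
  (∀ v ∈ sa.1, pvInB g v) ∧ pvClosed g sa.1 ∧
  ((sa.2 = [] ∧ sb.2 = none) ∨
   (∃ m b, PySem.List.min? sa.2 pvKey = some m ∧ sb.2 = some b ∧
     m.2.1.Nodup ∧ b.Nodup ∧ (∀ z, z ∈ m.2.1 ↔ z ∈ b) ∧ (∀ z ∈ b, pvInB g z) ∧
     m.2.2.2 = (b.length : Int)))

lemma pvMin?_append_singleton {α : Type} (l : List α) (x : α) (key : α → Int) :
    PySem.List.min? (l ++ [x]) key =
      some (match PySem.List.min? l key with
            | none => x
            | some m => if key x < key m then x else m) := by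
  cases hm : PySem.List.min? l key with
  | none =>
    unfold PySem.List.min? at hm ⊢
    rw [List.foldl_append, hm]
    rfl
  | some m =>
    unfold PySem.List.min? at hm ⊢
    rw [List.foldl_append, hm]
    simp only [List.foldl]
    split <;> rfl

lemma pvSameMemLen {l1 l2 : List PvCell} (h1 : l1.Nodup) (h2 : l2.Nodup)
    (h : ∀ z, z ∈ l1 ↔ z ∈ l2) : l1.length = l2.length :=
  ((List.perm_ext_iff_of_nodup h1 h2).2 h).length_eq

lemma pvStep_sim (g : List (List Int)) (rc : PvCell) (hrc : pvInB g rc)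
    {sa : PySem.Set PvCell × List (Int × PySem.Set PvCell × (Int × Int × Int × Int) × Int)}
    {sb : PySem.Set PvCell × Option (PySem.Set PvCell)} (hInv : pvInv g sa sb) :
    pvInv g (pvStepA g sa rc) (pvStepB g sb rc) := by
  obtain ⟨ndA, ndB, hmem, hinB, hcl, hrel⟩ := hInv
  by_cases hc : pvGval g rc.1 rc.2 ≠ 0 ∧ (rc.1, rc.2) ∉ sa.1
  · have hc' : pvGval g rc.1 rc.2 ≠ 0 ∧ (rc.1, rc.2) ∉ sb.1 :=
      ⟨hc.1, fun hm => hc.2 ((hmem _).2 hm)⟩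
    unfold pvStepA pvStepB
    rw [if_pos hc, if_pos hc']
    dsimp only
    have hNW : (pvH g).toNat * (pvW g).toNat = pvN g := by
      unfold pvH pvW pvN; simp
    set color := pvGval g rc.1 rc.2 with hcolor
    have hfuelA : 5 * (pvN g - sa.1.length) + ([(rc.1, rc.2)] : List PvCell).length ≤
        5 * ((pvH g).toNat * (pvW g).toNat) + 1 := by
      rw [hNW, List.length_singleton]
      have := Nat.sub_le (pvN g) sa.1.length
      omega
    obtain ⟨f1, f2, f3, f4, f5⟩ := pvFloodA_spec g color
      (5 * ((pvH g).toNat * (pvW g).toNat) + 1) [(rc.1, rc.2)] sa.1 PySem.Set.empty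
      ndA List.nodup_nil hinB hfuelA
    have hstart : ∀ z, (∃ s ∈ ([(rc.1, rc.2)] : List PvCell),
        pvRch (fun c => pvOk g color c ∧ c ∉ sa.1) s z) ↔
        pvRch (fun c => pvOk g color c ∧ c ∉ sa.1) (rc.1, rc.2) z := by
      intro z
      constructor
      · rintro ⟨s, hs, hr⟩
        rcases List.mem_singleton.1 hs with rfl
        exact hr
      · intro hr; exact ⟨(rc.1, rc.2), List.mem_singleton.2 rfl, hr⟩
    have hR : ∀ z, pvRch (fun c => pvOk g color c ∧ c ∉ sa.1) (rc.1, rc.2) z ↔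
        pvRch (pvOk g color) (rc.1, rc.2) z := by
      intro z
      constructor
      · exact pvRch_mono (fun c hc2 => hc2.1)
      · intro hr; exact pvRch_avoid_closed hcl hr hc.2
    have hokrc : pvOk g color (rc.1, rc.2) := ⟨hrc, rfl⟩
    have hinit : PySem.Set.add (PySem.Set.empty : PySem.Set PvCell) (rc.1, rc.2) =
        [(rc.1, rc.2)] := rfl
    rw [hinit]
    have hfuelB : pvN g + 1 ≤ ((pvH g).toNat * (pvW g).toNat + 1) +
        ([(rc.1, rc.2)] : List PvCell).length := by
      rw [hNW, List.length_singleton]; omega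
    obtain ⟨e1, e2⟩ := pvExpandB_spec g color (rc.1, rc.2)
      ((pvH g).toNat * (pvW g).toNat + 1) [(rc.1, rc.2)] [(rc.1, rc.2)]
      (List.nodup_singleton _)
      (fun c hc2 => by rcases List.mem_singleton.1 hc2 with rfl; exact hokrc)
      (fun c hc2 => hc2)
      (fun v hv hnv => absurd hv hnv)
      (fun c hc2 => by rcases List.mem_singleton.1 hc2 with rfl; exact .refl _ hokrc)
      (List.mem_singleton.2 rfl) hfuelB
    set FL := pvFloodA g (pvH g) (pvW g) color (5 * ((pvH g).toNat * (pvW g).toNat) + 1)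
      [(rc.1, rc.2)] sa.1 PySem.Set.empty with hFL
    set CO := pvExpandB g (pvH g) (pvW g) color ((pvH g).toNat * (pvW g).toNat + 1)
      [(rc.1, rc.2)] [(rc.1, rc.2)] with hCO
    have hpix : ∀ z, z ∈ FL.2 ↔ z ∈ CO := by
      intro z
      rw [f5 z, e2 z]
      constructor
      · rintro (h | h)
        · exact absurd h (List.not_mem_nil)
        · exact (hR z).1 ((hstart z).1 h)
      · intro h; exact Or.inr ((hstart z).2 ((hR z).2 h))
    have hlen : FL.2.length = CO.length := pvSameMemLen f2 e1 hpix
    refine ⟨f1, PySem.Set.nodup_union _ _ ndB, ?_, f3, ?_, ?_⟩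
    · intro z
      rw [PySem.Set.mem_union]
      constructor
      · intro hz
        rcases (f4 z).1 hz with hz | hz
        · exact Or.inl ((hmem z).1 hz)
        · exact Or.inr ((e2 z).2 ((hR z).1 ((hstart z).1 hz)))
      · rintro (hz | hz)
        · exact (f4 z).2 (Or.inl ((hmem z).2 hz))
        · exact (f4 z).2 (Or.inr ((hstart z).2 ((hR z).2 ((e2 z).1 hz))))
    · intro v hv n hn hinBn hgval
      rcases (f4 v).1 hv with hvV | hvR
      · exact (f4 n).2 (Or.inl (hcl v hvV n hn hinBn hgval))
      · have hRv : pvRch (pvOk g color) (rc.1, rc.2) v := (hR v).1 ((hstart v).1 hvR)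
        have hokv := pvRch_ok_right hRv
        have hokn : pvOk g color n := ⟨hinBn, by rw [hgval, hokv.2]⟩
        exact (f4 n).2 (Or.inr ((hstart n).2 ((hR n).2 (.tail hRv hn hokn))))
    · have hinbcomp : ∀ z ∈ CO, pvInB g z :=
        fun z hz => (pvRch_ok_right ((e2 z).1 hz)).1
      have hkm : ∀ x : Int × PySem.Set PvCell × (Int × Int × Int × Int) × Int,
          pvKey x = x.2.2.2 := fun _ => rfl
      rcases hrel with ⟨ha2, hb2⟩ | ⟨m, b, hmin, hb2, hm1, hb1, hiff, hinb, hsz⟩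
      · rw [ha2, hb2]
        dsimp only
        refine Or.inr ⟨(color, FL.2,
            ((PySem.List.min? (FL.2.map (fun p => p.1)) (fun x => x)).getD 0,
             (PySem.List.min? (FL.2.map (fun p => p.2)) (fun x => x)).getD 0,
             (PySem.List.max? (FL.2.map (fun p => p.1)) (fun x => x)).getD 0,
             (PySem.List.max? (FL.2.map (fun p => p.2)) (fun x => x)).getD 0),
            (FL.2.length : Int)), CO, ?_, rfl, f2, e1, hpix, hinbcomp, ?_⟩
        · rw [pvMin?_append_singleton]
          rfl
        · show (FL.2.length : Int) = (CO.length : Int)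
          rw [hlen]
      · rw [hb2]
        dsimp only
        rw [pvMin?_append_singleton, hmin]
        dsimp only
        rw [hkm, hkm]
        by_cases hlt : CO.length < b.length
        · have h1 : ((FL.2.length : Int)) < m.2.2.2 := by
            rw [hsz, hlen]
            exact_mod_cast hlt
          rw [if_pos h1, if_pos hlt]
          refine Or.inr ⟨_, CO, rfl, rfl, f2, e1, hpix, hinbcomp, ?_⟩
          show (FL.2.length : Int) = (CO.length : Int)
          rw [hlen]
        · have h1 : ¬ ((FL.2.length : Int)) < m.2.2.2 := by
            rw [hsz, hlen]
            exact fun h => hlt (by exact_mod_cast h)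
          rw [if_neg h1, if_neg hlt]
          exact Or.inr ⟨m, b, rfl, rfl, hm1, hb1, hiff, hinb, hsz⟩
  · have hc' : ¬(pvGval g rc.1 rc.2 ≠ 0 ∧ (rc.1, rc.2) ∉ sb.1) := by
      rintro ⟨h1, h2⟩
      exact hc ⟨h1, fun hm => h2 ((hmem _).1 hm)⟩
    unfold pvStepA pvStepB
    rw [if_neg hc, if_neg hc']
    exact ⟨ndA, ndB, hmem, hinB, hcl, hrel⟩

lemma pvFold_sim (g : List (List Int)) :
    ∀ (cells : List PvCell), (∀ p ∈ cells, pvInB g p) →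
    ∀ sa sb, pvInv g sa sb →
    pvInv g (cells.foldl (pvStepA g) sa) (cells.foldl (pvStepB g) sb) := by
  intro cells
  induction cells with
  | nil => intro _ sa sb h; exact h
  | cons p tl ih =>
    intro hmem sa sb h
    exact ih (fun q hq => hmem q (List.mem_cons_of_mem _ hq)) _ _
      (pvStep_sim g p (hmem p (List.mem_cons_self)) h)

lemma pvComponents_eq (g : List (List Int)) (hg : ¬(g = [] ∨ g.headD [] = [])) :
    pvComponents g = ((pvAllCells g).foldl (pvStepA g) (PySem.Set.empty, [])).2 := by
  unfold pvComponents pvAllCells pvStepA pvH pvW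
  rw [if_neg hg]
  rw [List.foldl_flatMap]
  simp only [List.foldl_map]

lemma pvAlt_eq (g : List (List Int)) (hg : ¬(g = [] ∨ g.headD [] = [])) :
    remove_smallest_object_alt g =
      (match ((pvAllCells g).foldl (pvStepB g) (PySem.Set.empty, none)).2 with
       | none => g.map (fun row => row)
       | some best => best.foldl (fun res p => pvSetCell res p.1 p.2 0) (g.map (fun row => row))) := by
  unfold remove_smallest_object_alt pvAllCells pvStepB pvH pvW
  rw [if_neg hg]
  rw [List.foldl_flatMap]
  simp only [List.foldl_map]

lemma pvSetCell_nonneg (g : List (List Int)) (r c v : Int) (hr : 0 ≤ r) (hc : 0 ≤ c) :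
    pvSetCell g r c v = g.set r.toNat ((g.getD r.toNat []).set c.toNat v) := by
  simp only [pvSetCell, PySem.List.pySetD_of_nonneg _ _ hr, PySem.List.pySetD_of_nonneg _ _ hc,
    PySem.List.pyGetD, PySem.List.pyGet?_of_nonneg _ hr, List.getD]

lemma pvSetCell_comm (x y : PvCell) (hx : 0 ≤ x.1 ∧ 0 ≤ x.2) (hy : 0 ≤ y.1 ∧ 0 ≤ y.2)
    (z : List (List Int)) :
    pvSetCell (pvSetCell z x.1 x.2 0) y.1 y.2 0 = pvSetCell (pvSetCell z y.1 y.2 0) x.1 x.2 0 := by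
  simp only [pvSetCell_nonneg _ _ _ _ hx.1 hx.2, pvSetCell_nonneg _ _ _ _ hy.1 hy.2]
  by_cases hii : x.1.toNat = y.1.toNat
  · rw [← hii]
    by_cases hlen : x.1.toNat < z.length
    · simp only [List.getD, List.getElem?_set_self (by simpa using hlen), Option.getD_some,
        List.set_set]
      congr 1
      by_cases hjj : x.2.toNat = y.2.toNat
      · rw [hjj, List.set_set]
      · rw [List.set_comm _ _ hjj]
    · have hz : ∀ R, z.set x.1.toNat R = z := fun R => List.set_eq_of_length_le (by omega)
      simp only [hz]
  · have hii' : y.1.toNat ≠ x.1.toNat := fun h => hii h.symm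
    simp only [List.getD, List.getElem?_set_ne hii, List.getElem?_set_ne hii']
    rw [List.set_comm _ _ hii]



-- ===== VERDICT (by name: the statement is the Claim_ definition above) =====
theorem remove_smallest_object_spec : Claim_equal_remove_smallest_object := by
  intro grid _ _
  unfold Spec_remove_smallest_object
  by_cases hg : grid = [] ∨ grid.headD [] = []
  · unfold remove_smallest_object pvComponents remove_smallest_object_alt
    rw [if_pos hg, if_pos hg]
    rfl
  · have hA := pvComponents_eq grid hg
    have hB := pvAlt_eq grid hg
    rw [hB]
    unfold remove_smallest_object
    rw [hA]
    have hInv0 : pvInv grid (PySem.Set.empty, []) (PySem.Set.empty, none) := by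
      refine ⟨List.nodup_nil, List.nodup_nil, fun z => Iff.rfl, ?_, ?_, Or.inl ⟨rfl, rfl⟩⟩
      · intro v hv; exact absurd hv (List.not_mem_nil)
      · intro v hv; exact absurd hv (List.not_mem_nil)
    obtain ⟨_, _, _, _, _, hrel⟩ := pvFold_sim grid (pvAllCells grid)
      (fun p hp => mem_pvAllCells.1 hp) _ _ hInv0
    rcases hrel with ⟨ha2, hb2⟩ | ⟨m, b, hmin, hb2, hm1, hb1, hiff, hinb, hsz⟩
    · rw [ha2, hb2]
      rfl
    · dsimp only
      have hmin' : PySem.List.min?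
          (List.foldl (pvStepA grid) (PySem.Set.empty, []) (pvAllCells grid)).2
          (fun o => o.2.2.2) = some m := hmin
      rw [hmin', hb2]
      dsimp only
      have hperm : m.2.1.Perm b := (List.perm_ext_iff_of_nodup hm1 hb1).2 hiff
      refine List.Perm.foldl_eq' hperm ?_ _
      intro x hx y hy z
      have hbx : pvInB grid x := hinb x ((hiff x).1 hx)
      have hby : pvInB grid y := hinb y ((hiff y).1 hy)
      exact pvSetCell_comm x y ⟨hbx.1, hbx.2.2.1⟩ ⟨hby.1, hby.2.2.1⟩ z
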